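-- pv_equiv track=rewrite | github.com/mjhaahr/Advent-of-Code-2024 | puzzles/day-22/solution.py | findBestSequence
-- ===== SOURCE A (Python) =====
-- from collections import deque, defaultdict
--
-- def findBestSequence(numbers, iters):
--     results = []
--     sequenceScores = defaultdict(lambda: 0)
--     for num in numbers:
--         results = findPrices(num, iters)
--
--         for sequence, score in findSequenceScores(results).items():
--             sequenceScores[sequence] += score
--
--     return max(sequenceScores.values())
--
-- def findSequenceScores(prices):
--     sequenceScores = defaultdict(lambda: 0)
--     for p, s in prices:
--         if s not in sequenceScores:
--             sequenceScores[s] = p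
--
--     return sequenceScores
--
-- def findPrices(num, iters):
--     price = num % 10
--
--     results = []
--     sequence = deque()
--
--     for i in range(iters):
--         num = calcSecret(num)
--         newPrice = num % 10
--         delta = newPrice - price
--         price = newPrice
--         sequence.append(delta)
--         if len(sequence) == 4:
--             results.append((price, tuple(sequence)))
--             sequence.popleft()
--
--     return results
--
-- def calcSecret(num):
--     num = mix(num * 64, num)
--     num = prune(num)
--
--     num = mix(num // 32, num)
--     num = prune(num)
--
--     num = mix(num * 2048, num)
--     num = prune(num)
--
--     return num
--
-- def mix(num, secret):
--     return num ^ secret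
--
-- def prune(num):
--     return num % 16777216
-- ===== SOURCE B (Python) =====
-- from collections import Counter
--
-- def findBestSequence(numbers, iters):
--     total = Counter()
--     for num in numbers:
--         prices = []
--         s = num
--         for _ in range(iters):
--             s = ((s * 64) ^ s) % 16777216
--             s = ((s // 32) ^ s) % 16777216
--             s = ((s * 2048) ^ s) % 16777216
--             prices.append(s % 10)
--         deltas = [b - a for a, b in zip([num % 10] + prices, prices)]
--         windows = list(zip(deltas, deltas[1:], deltas[2:], deltas[3:]))
--         firsts = dict(reversed(list(zip(windows, prices[3:]))))
--         total.update(firsts)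
--     return max(total.values())
-- ===== Notes on version B (the rewrite author's own statement) =====
-- stated objective: simpler
-- what changed: A fuses simulation, sliding-window deque maintenance, a membership-tested first-occurrence dict and a defaultdict merge across four functions; B is one short staged pipeline: simulate only the price stream, form the 4-delta windows afterwards by zipping the shifted delta list, deduplicate by building a dict from the REVERSED (window, price) pairs (overwrite keeps the first occurrence, no membership test), and aggregate with Counter.update.
import Mathlib
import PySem

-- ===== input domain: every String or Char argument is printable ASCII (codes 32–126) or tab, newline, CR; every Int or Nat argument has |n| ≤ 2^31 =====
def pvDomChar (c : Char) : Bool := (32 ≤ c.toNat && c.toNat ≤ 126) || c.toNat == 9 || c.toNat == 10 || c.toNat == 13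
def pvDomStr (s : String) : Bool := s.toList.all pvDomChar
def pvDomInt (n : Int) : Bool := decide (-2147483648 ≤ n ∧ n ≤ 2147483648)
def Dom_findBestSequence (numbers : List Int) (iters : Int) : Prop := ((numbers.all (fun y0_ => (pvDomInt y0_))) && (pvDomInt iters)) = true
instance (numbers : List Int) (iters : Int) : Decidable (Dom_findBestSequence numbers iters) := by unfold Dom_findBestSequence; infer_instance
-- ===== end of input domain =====

-- B replaces A's fused simulate+deque+membership-test+defaultdict pipeline (four functions) by one
-- staged pipeline: simulate the price stream, form 4-delta windows by zipping the shifted delta list,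
-- dedup by building a dict from the REVERSED pairs (overwrite = first occurrence), aggregate with Counter.
-- Objective: simpler. Equal return value on Pre_ (A raises ValueError in max() outside it).
-- Python dicts here are internal only (no dict in the signature) and are realised as Std.HashMap:
-- its iteration order differs from Python's insertion order, but both programs consume them only
-- through per-key sums and a final max over the values, which are order-independent, so the
-- returned value is exact.


-- ===== PORT A =====
def pvMix (num secret : Int) : Int := PySem.Int.bxor num secret

def pvPrune (num : Int) : Int := PySem.Int.mod num 16777216

def pvCalcSecret (num : Int) : Int :=
  let num := pvPrune (pvMix (num * 64) num)
  let num := pvPrune (pvMix (PySem.Int.floordiv num 32) num)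
  let num := pvPrune (pvMix (num * 2048) num)
  num

-- one iteration of findPrices' loop (state: num, price, sequence (deque as list), results)
def pvStepA (s : Int × Int × List Int × List (Int × (Int × Int × Int × Int))) (_i : Int) :
    Int × Int × List Int × List (Int × (Int × Int × Int × Int)) :=
  match s with
  | (num, price, seq, results) =>
    let num := pvCalcSecret num
    let newPrice := PySem.Int.mod num 10
    let delta := newPrice - price
    let price := newPrice
    let seq := seq ++ [delta]
    if seq.length == 4 then
      (num, price, seq.drop 1, results ++ [(price, (seq.getD 0 0, seq.getD 1 0, seq.getD 2 0, seq.getD 3 0))])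
    else
      (num, price, seq, results)

def pvFindPrices (num iters : Int) : List (Int × (Int × Int × Int × Int)) :=
  let price := PySem.Int.mod num 10
  ((PySem.List.pyRange 0 iters 1).foldl pvStepA (num, price, [], [])).2.2.2

def pvFindSequenceScores (prices : List (Int × (Int × Int × Int × Int))) :
    Std.HashMap (Int × Int × Int × Int) Int :=
  prices.foldl (fun d ps => if d.contains ps.2 then d else d.insert ps.2 ps.1) ∅

def findBestSequence (numbers : List Int) (iters : Int) : Int :=
  let sequenceScores := numbers.foldl (fun g num =>
      let results := pvFindPrices num iters
      (pvFindSequenceScores results).toList.foldl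
        (fun g p => g.insert p.1 (g.getD p.1 0 + p.2)) g)
    (∅ : Std.HashMap (Int × Int × Int × Int) Int)
  -- max(d.values()): d.toList.map (·.2) is the value list; ValueError on an empty dict is
  -- excluded by Pre_, where the .getD 0 default is never used
  (PySem.List.max? (sequenceScores.toList.map (fun p => p.2)) (fun x => x)).getD 0

-- ===== PORT B =====
-- the price-simulation loop of B (state: secret s, list of prices)
def pvSimPrices (num iters : Int) : Int × List Int :=
  (PySem.List.pyRange 0 iters 1).foldl (fun st _ =>
    let s := st.1
    let s := PySem.Int.mod (PySem.Int.bxor (s * 64) s) 16777216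
    let s := PySem.Int.mod (PySem.Int.bxor (PySem.Int.floordiv s 32) s) 16777216
    let s := PySem.Int.mod (PySem.Int.bxor (s * 2048) s) 16777216
    (s, st.2 ++ [PySem.Int.mod s 10])) (num, [])

def findBestSequence_alt (numbers : List Int) (iters : Int) : Int :=
  let total := numbers.foldl (fun t num =>
      let prices := (pvSimPrices num iters).2
      -- [b - a for a, b in zip([num % 10] + prices, prices)]
      let deltas := (List.zip (PySem.Int.mod num 10 :: prices) prices).map (fun p => p.2 - p.1)
      -- zip(deltas, deltas[1:], deltas[2:], deltas[3:]); deltas[k:] = .drop k (exact: PySem.List.slice_from_natCast)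
      let windows := List.zip deltas (List.zip (deltas.drop 1) (List.zip (deltas.drop 2) (deltas.drop 3)))
      -- dict(reversed(list(zip(windows, prices[3:]))))
      let firsts := (List.zip windows (prices.drop 3)).reverse.foldl
        (fun d p => d.insert p.1 p.2)
        (∅ : Std.HashMap (Int × Int × Int × Int) Int)
      -- total.update(firsts): Counter.update adds counts
      firsts.toList.foldl (fun t p => t.insert p.1 (t.getD p.1 0 + p.2)) t)
    (∅ : Std.HashMap (Int × Int × Int × Int) Int)
  -- max(total.values()): ValueError on an empty Counter is excluded by Pre_
  (PySem.List.max? (total.toList.map (fun p => p.2)) (fun x => x)).getD 0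

-- ===== PRECONDITION & SPEC =====
-- Pre_ excludes exactly the inputs where A's max() raises ValueError (empty numbers, or iters < 4,
-- when no 4-delta window ever forms and the dict stays empty); B's max() raises there too.
def Pre_findBestSequence (numbers : List Int) (iters : Int) : Prop := numbers ≠ [] ∧ 4 ≤ iters
instance (numbers : List Int) (iters : Int) : Decidable (Pre_findBestSequence numbers iters) := by unfold Pre_findBestSequence; infer_instance

def pvWitness_findBestSequence : List Int × Int := ([123], 10)

def Spec_findBestSequence (numbers : List Int) (iters : Int) (out : Int) : Prop := out = findBestSequence_alt numbers iters
instance (numbers : List Int) (iters : Int) (out : Int) : Decidable (Spec_findBestSequence numbers iters out) := by unfold Spec_findBestSequence; infer_instance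

-- ===== CLAIM (what is proved, stated in full; the proofs are below) =====
def Claim_equal_findBestSequence : Prop := ∀ (numbers : List Int) (iters : Int), Dom_findBestSequence numbers iters → Pre_findBestSequence numbers iters → Spec_findBestSequence numbers iters (findBestSequence numbers iters)

-- ===== LEMMAS AND PROOFS =====

-- ===== LEMMAS AND PROOFS =====

-- the exact secret / price / delta sequences both programs walk
def pvSec (num : Int) : Nat → Int
  | 0 => num
  | k+1 => pvCalcSecret (pvSec num k)

def pvPr (num : Int) (k : Nat) : Int := PySem.Int.mod (pvSec num k) 10

def pvD (num : Int) (k : Nat) : Int := pvPr num (k+1) - pvPr num k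

-- a fold whose step ignores the element is an iterate
theorem pv_foldl_const {α β : Type} (g : α → α) (l : List β) : ∀ (i : α),
    l.foldl (fun st _ => g st) i = g^[l.length] i := by
  induction l with
  | nil => intro i; rfl
  | cons x xs ih => intro i; simpa [Function.iterate_succ_apply] using ih (g i)

def pvAStep (s : Int × Int × List Int × List (Int × (Int × Int × Int × Int))) :
    Int × Int × List Int × List (Int × (Int × Int × Int × Int)) := pvStepA s 0

def pvBStep (st : Int × List Int) : Int × List Int :=
  (pvCalcSecret st.1, st.2 ++ [PySem.Int.mod (pvCalcSecret st.1) 10])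

theorem pvB_eta : (fun (st : Int × List Int) (_ : Int) =>
    let s := st.1
    let s := PySem.Int.mod (PySem.Int.bxor (s * 64) s) 16777216
    let s := PySem.Int.mod (PySem.Int.bxor (PySem.Int.floordiv s 32) s) 16777216
    let s := PySem.Int.mod (PySem.Int.bxor (s * 2048) s) 16777216
    (s, st.2 ++ [PySem.Int.mod s 10])) = (fun st _ => pvBStep st) := rfl

theorem pvA_eta : pvStepA = (fun s _ => pvAStep s) := rfl

theorem pvB_iter (num : Int) : ∀ n, pvBStep^[n] (num, []) =
    (pvSec num n, (List.range n).map fun k => pvPr num (k+1)) := by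
  intro n
  induction n with
  | zero => rfl
  | succ n ih =>
    rw [Function.iterate_succ_apply', ih]
    simp [pvBStep, pvSec, pvPr, List.range_succ]

def pvSeq (num : Int) (n : Nat) : List Int :=
  (List.range (min n 3)).map (fun t => pvD num (n - min n 3 + t))

def pvRes (num : Int) (n : Nat) : List (Int × (Int × Int × Int × Int)) :=
  (List.range (n-3)).map (fun t =>
    (pvPr num (t+4), (pvD num t, pvD num (t+1), pvD num (t+2), pvD num (t+3))))

theorem pvA_iter (num : Int) : ∀ n, pvAStep^[n] (num, pvPr num 0, [], []) =
    (pvSec num n, pvPr num n, pvSeq num n, pvRes num n) := by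
  intro n
  induction n with
  | zero => rfl
  | succ n ih =>
    rw [Function.iterate_succ_apply', ih]
    have hr3 : List.range 3 = [0, 1, 2] := by decide
    by_cases h3 : 3 ≤ n
    · have hm : min n 3 = 3 := by omega
      have hseq : pvSeq num n = [pvD num (n-3), pvD num (n-2), pvD num (n-1)] := by
        unfold pvSeq
        rw [hm, hr3, List.map_cons, List.map_cons, List.map_cons, List.map_nil]
        rw [show n - 3 + 0 = n - 3 by omega, show n - 3 + 1 = n - 2 by omega,
          show n - 3 + 2 = n - 1 by omega]
      have hseq' : pvSeq num (n+1) = [pvD num (n-2), pvD num (n-1), pvD num n] := by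
        unfold pvSeq
        rw [show min (n+1) 3 = 3 by omega, hr3, List.map_cons, List.map_cons, List.map_cons,
          List.map_nil]
        rw [show n + 1 - 3 + 0 = n - 2 by omega, show n + 1 - 3 + 1 = n - 1 by omega,
          show n + 1 - 3 + 2 = n by omega]
      have hres' : pvRes num (n+1) = pvRes num n ++
          [(pvPr num (n+1), (pvD num (n-3), pvD num (n-2), pvD num (n-1), pvD num n))] := by
        unfold pvRes
        rw [show n + 1 - 3 = (n - 3) + 1 by omega, List.range_succ, List.map_append,
          List.map_cons, List.map_nil]
        rw [show n - 3 + 4 = n + 1 by omega, show n - 3 + 1 = n - 2 by omega,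
          show n - 3 + 2 = n - 1 by omega, show n - 3 + 3 = n by omega]
      simp only [pvAStep, pvStepA, hseq]
      rw [hseq', hres']
      rfl
    · have hm : min n 3 = n := by omega
      have hseq : pvSeq num n = (List.range n).map (pvD num) := by
        unfold pvSeq
        rw [hm]
        simp
      have hseq' : pvSeq num (n+1) = (List.range (n+1)).map (pvD num) := by
        unfold pvSeq
        rw [show min (n+1) 3 = n+1 by omega]
        simp
      simp only [pvAStep, pvStepA, hseq]
      rw [show PySem.Int.mod (pvCalcSecret (pvSec num n)) 10 - pvPr num n = pvD num n from rfl]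
      rw [if_neg (show ¬ ((((List.range n).map (pvD num) ++ [pvD num n]).length == 4) = true) by
        simp; omega)]
      rw [hseq']
      rw [show pvRes num (n+1) = pvRes num n by unfold pvRes; rw [show n + 1 - 3 = n - 3 by omega]]
      simp only [Prod.mk.injEq, and_true]
      exact ⟨rfl, rfl, by rw [List.range_succ, List.map_append, List.map_cons, List.map_nil]⟩

theorem pvFindPrices_eq (num iters : Int) :
    pvFindPrices num iters = pvRes num iters.toNat := by
  show ((PySem.List.pyRange 0 iters 1).foldl pvStepA (num, PySem.Int.mod num 10, [], [])).2.2.2 = _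
  rw [pvA_eta]
  rw [pv_foldl_const pvAStep]
  have hlen : (PySem.List.pyRange 0 iters 1).length = iters.toNat := by
    simp [PySem.List.length_pyRange_one]
  rw [hlen, show PySem.Int.mod num 10 = pvPr num 0 from rfl, pvA_iter]

theorem pvSim_eq (num iters : Int) : pvSimPrices num iters =
    (pvSec num iters.toNat, (List.range iters.toNat).map fun k => pvPr num (k+1)) := by
  unfold pvSimPrices
  rw [pvB_eta, pv_foldl_const]
  have hlen : (PySem.List.pyRange 0 iters 1).length = iters.toNat := by
    simp [PySem.List.length_pyRange_one]
  rw [hlen, pvB_iter]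

-- the (window, price) pair list both programs deduplicate, in the same order
def pvMList (num : Int) (N : Nat) : List ((Int × Int × Int × Int) × Int) :=
  (List.range (N-3)).map (fun t =>
    ((pvD num t, pvD num (t+1), pvD num (t+2), pvD num (t+3)), pvPr num (t+4)))

theorem pvDeltas_eq (num : Int) (N : Nat) :
    (List.zip (PySem.Int.mod num 10 :: (List.range N).map (fun k => pvPr num (k+1)))
        ((List.range N).map (fun k => pvPr num (k+1)))).map (fun p => p.2 - p.1)
      = (List.range N).map (pvD num) := by
  have hcons : PySem.Int.mod num 10 :: (List.range N).map (fun k => pvPr num (k+1))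
      = (List.range (N+1)).map (pvPr num) := by
    rw [List.range_succ_eq_map, List.map_cons, List.map_map]
    rfl
  rw [hcons]
  apply List.ext_getElem
  · simp
  · intro k h1 h2
    simp [List.getElem_zip]
    rfl

theorem pvZip_eq (num : Int) (N : Nat) :
    List.zip (List.zip ((List.range N).map (pvD num))
        (List.zip (((List.range N).map (pvD num)).drop 1)
          (List.zip (((List.range N).map (pvD num)).drop 2) (((List.range N).map (pvD num)).drop 3))))
      (((List.range N).map (fun k => pvPr num (k+1))).drop 3) = pvMList num N := by
  apply List.ext_getElem
  · simp [pvMList]; omega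
  · intro t h1 h2
    simp only [List.getElem_zip, List.getElem_drop, List.getElem_map, List.getElem_range, pvMList]
    rw [Nat.add_comm 1 t, Nat.add_comm 2 t, Nat.add_comm 3 t, show t + 3 + 1 = t + 4 by omega]

theorem pvRes_eq_swap (num : Int) (N : Nat) :
    pvRes num N = (pvMList num N).map (fun p => (p.2, p.1)) := by
  unfold pvRes pvMList
  rw [List.map_map]
  rfl


-- A's first-occurrence dict build (helper name for the fold in pvFindSequenceScores)
def pvGA (d : Std.HashMap (Int × Int × Int × Int) Int)
    (L : List ((Int × Int × Int × Int) × Int)) : Std.HashMap (Int × Int × Int × Int) Int :=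
  L.foldl (fun d p => if d.contains p.1 then d else d.insert p.1 p.2) d

-- B's reversed-overwrite dict build
def pvGB (L : List ((Int × Int × Int × Int) × Int)) : Std.HashMap (Int × Int × Int × Int) Int :=
  L.reverse.foldl (fun d p => d.insert p.1 p.2) ∅

theorem pvGA_get? (L : List ((Int × Int × Int × Int) × Int)) :
    ∀ (d : Std.HashMap (Int × Int × Int × Int) Int) (k : Int × Int × Int × Int),
    (pvGA d L)[k]? = if d.contains k then d[k]? else (pvGA ∅ L)[k]? := by
  induction L with
  | nil =>
    intro d k
    by_cases h : d.contains k
    · simp [pvGA, h]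
    · simp only [pvGA, List.foldl_nil, h, Bool.false_eq_true, if_false]
      rw [Std.HashMap.getElem?_empty]
      rw [Std.HashMap.contains_eq_isSome_getElem?] at h
      exact Option.not_isSome_iff_eq_none.1 (by simpa using h)
  | cons p L ih =>
    intro d k
    have hstep : pvGA d (p :: L) = pvGA (if d.contains p.1 then d else d.insert p.1 p.2) L := rfl
    have hstep0 : pvGA ∅ (p :: L) = pvGA ((∅ : Std.HashMap (Int × Int × Int × Int) Int).insert p.1 p.2) L := by
      simp [pvGA]
    rw [hstep, hstep0, ih, ih ((∅ : Std.HashMap (Int × Int × Int × Int) Int).insert p.1 p.2) k]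
    by_cases hdk : d.contains k
    · rw [if_pos hdk]
      by_cases hdp : d.contains p.1
      · rw [if_pos hdp, if_pos hdk]
      · rw [if_neg hdp]
        have hkp : ¬ (p.1 == k) = true := by
          simp only [beq_iff_eq]
          intro h
          exact hdp (h ▸ hdk)
        rw [if_pos (by rw [Std.HashMap.contains_insert, hdk]; simp),
          Std.HashMap.getElem?_insert, if_neg hkp]
    · rw [if_neg hdk]
      by_cases hkp : p.1 = k
      · subst hkp
        rw [if_neg hdk,
          if_pos (show ((d.insert p.1 p.2).contains p.1) = true by
            rw [Std.HashMap.contains_insert]; simp),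
          if_pos (show (((∅ : Std.HashMap (Int × Int × Int × Int) Int).insert p.1 p.2).contains p.1) = true by
            rw [Std.HashMap.contains_insert]; simp),
          Std.HashMap.getElem?_insert, if_pos (by simp), Std.HashMap.getElem?_insert,
          if_pos (by simp)]
      · have hb : ¬ (p.1 == k) = true := by simpa using hkp
        have hc1 : (d.insert p.1 p.2).contains k = d.contains k := by
          rw [Std.HashMap.contains_insert]; simp [hkp]
        have hc0 : ((∅ : Std.HashMap (Int × Int × Int × Int) Int).insert p.1 p.2).contains k = false := by
          rw [Std.HashMap.contains_insert]; simp [hkp, Std.HashMap.contains_empty]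
        by_cases hdp : d.contains p.1
        · rw [if_pos hdp, if_neg hdk, hc0, if_neg (by simp)]
        · rw [if_neg hdp, hc1, if_neg (by simp [hdk]), hc0, if_neg (by simp)]

theorem pvGA_cons (p : (Int × Int × Int × Int) × Int) (L : List ((Int × Int × Int × Int) × Int))
    (k : Int × Int × Int × Int) :
    (pvGA ∅ (p :: L))[k]? = if p.1 = k then some p.2 else (pvGA ∅ L)[k]? := by
  have hstep0 : pvGA ∅ (p :: L) = pvGA ((∅ : Std.HashMap (Int × Int × Int × Int) Int).insert p.1 p.2) L := by
    simp [pvGA]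
  rw [hstep0, pvGA_get?]
  by_cases hkp : p.1 = k
  · subst hkp
    rw [if_pos (by rw [Std.HashMap.contains_insert]; simp),
      Std.HashMap.getElem?_insert, if_pos (by simp), if_pos rfl]
  · rw [if_neg (by rw [Std.HashMap.contains_insert]; simp [hkp, Std.HashMap.contains_empty]),
      if_neg hkp]

theorem pvGB_cons (p : (Int × Int × Int × Int) × Int) (L : List ((Int × Int × Int × Int) × Int))
    (k : Int × Int × Int × Int) :
    (pvGB (p :: L))[k]? = if p.1 = k then some p.2 else (pvGB L)[k]? := by
  unfold pvGB
  rw [List.reverse_cons, List.foldl_append, List.foldl_cons, List.foldl_nil,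
    Std.HashMap.getElem?_insert]
  simp only [beq_iff_eq]

theorem pvGAB (L : List ((Int × Int × Int × Int) × Int)) (k : Int × Int × Int × Int) :
    (pvGA ∅ L)[k]? = (pvGB L)[k]? := by
  induction L with
  | nil => rfl
  | cons p L ih => rw [pvGA_cons, pvGB_cons, ih]

-- the merge loop g[k] += v over a pair list
def pvMerge (g : Std.HashMap (Int × Int × Int × Int) Int)
    (l : List ((Int × Int × Int × Int) × Int)) : Std.HashMap (Int × Int × Int × Int) Int :=
  l.foldl (fun g p => g.insert p.1 (g.getD p.1 0 + p.2)) g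

theorem pvMerge_getD (l : List ((Int × Int × Int × Int) × Int)) :
    ∀ (g : Std.HashMap (Int × Int × Int × Int) Int) (k : Int × Int × Int × Int),
    (pvMerge g l).getD k 0
      = g.getD k 0 + ((l.filter (fun p => p.1 == k)).map (fun p => p.2)).sum := by
  induction l with
  | nil => intro g k; simp [pvMerge]
  | cons p l ih =>
    intro g k
    have hstep : pvMerge g (p :: l) = pvMerge (g.insert p.1 (g.getD p.1 0 + p.2)) l := rfl
    rw [hstep, ih, List.filter_cons]
    by_cases hpk : p.1 = k
    · subst hpk
      rw [if_pos (by simp), Std.HashMap.getD_insert, if_pos (by simp)]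
      simp only [List.map_cons, List.sum_cons]
      ring
    · rw [if_neg (by simp [hpk]), Std.HashMap.getD_insert, if_neg (by simpa using hpk)]

theorem pvMerge_contains (l : List ((Int × Int × Int × Int) × Int)) :
    ∀ (g : Std.HashMap (Int × Int × Int × Int) Int) (k : Int × Int × Int × Int),
    (pvMerge g l).contains k = (g.contains k || l.any (fun p => p.1 == k)) := by
  induction l with
  | nil => intro g k; simp [pvMerge]
  | cons p l ih =>
    intro g k
    have hstep : pvMerge g (p :: l) = pvMerge (g.insert p.1 (g.getD p.1 0 + p.2)) l := rfl
    rw [hstep, ih, List.any_cons, Std.HashMap.contains_insert]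
    cases hx : (p.1 == k) <;> cases hg : g.contains k <;> simp

theorem pv_filter_distinct (l : List ((Int × Int × Int × Int) × Int))
    (hd : l.Pairwise (fun a b => (a.1 == b.1) = false)) (k : Int × Int × Int × Int) (v : Int)
    (hm : (k, v) ∈ l) : l.filter (fun p => p.1 == k) = [(k, v)] := by
  induction l with
  | nil => cases hm
  | cons x xs ih =>
    rcases List.pairwise_cons.1 hd with ⟨hx, hxs⟩
    rcases List.mem_cons.1 hm with hm | hm
    · subst hm
      simp only [List.filter_cons, BEq.rfl, if_pos]
      have hnil : xs.filter (fun p => p.1 == k) = [] := by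
        rw [List.filter_eq_nil_iff]
        intro p hp
        have h1 : (k == p.1) = false := by simpa using hx p hp
        simp only [Bool.not_eq_true]
        rw [show (p.1 == k) = (k == p.1) from by
          cases hbe : (p.1 == k) <;> cases hbe2 : (k == p.1) <;> simp_all, h1]
      simp [hnil]
    · have hb : (x.1 == k) = false := hx (k, v) hm
      simp only [List.filter_cons, hb, Bool.false_eq_true, if_false]
      exact ih hxs hm

theorem pv_filter_toList (d : Std.HashMap (Int × Int × Int × Int) Int) (k : Int × Int × Int × Int) :
    ((d.toList.filter (fun p => p.1 == k)).map (fun p => p.2)).sum = d.getD k 0 := by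
  cases h : d[k]? with
  | none =>
    have hf : d.toList.filter (fun p => p.1 == k) = [] := by
      rw [List.filter_eq_nil_iff]
      intro p hp
      have := Std.HashMap.mem_toList_iff_getElem?_eq_some.1 hp
      simp only [beq_iff_eq]
      intro hpk
      rw [hpk] at this
      rw [this] at h
      cases h
    rw [hf]
    simp [Std.HashMap.getD_eq_getD_getElem?, h]
  | some v =>
    have hm : (k, v) ∈ d.toList := Std.HashMap.mem_toList_iff_getElem?_eq_some.2 h
    rw [pv_filter_distinct d.toList Std.HashMap.distinct_keys_toList k v hm]
    simp [Std.HashMap.getD_eq_getD_getElem?, h]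

theorem pvMerge_getD_dict (g d : Std.HashMap (Int × Int × Int × Int) Int)
    (k : Int × Int × Int × Int) :
    (pvMerge g d.toList).getD k 0 = g.getD k 0 + d.getD k 0 := by
  rw [pvMerge_getD, pv_filter_toList]

theorem pvMerge_contains_dict (g d : Std.HashMap (Int × Int × Int × Int) Int)
    (k : Int × Int × Int × Int) :
    (pvMerge g d.toList).contains k = (g.contains k || d.contains k) := by
  rw [pvMerge_contains]
  congr 1
  cases h : d[k]? with
  | none =>
    have hc : d.contains k = false := by
      rw [Std.HashMap.contains_eq_isSome_getElem?, h]; rfl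
    rw [hc, List.any_eq_false]
    intro p hp
    have := Std.HashMap.mem_toList_iff_getElem?_eq_some.1 hp
    simp only [beq_iff_eq]
    intro hpk
    rw [hpk] at this
    rw [this] at h
    cases h
  | some v =>
    have hc : d.contains k = true := by
      rw [Std.HashMap.contains_eq_isSome_getElem?, h]; rfl
    rw [hc, List.any_eq_true]
    exact ⟨(k, v), Std.HashMap.mem_toList_iff_getElem?_eq_some.2 h, by simp⟩

theorem pv_dA_eq (num iters : Int) :
    pvFindSequenceScores (pvFindPrices num iters) = pvGA ∅ (pvMList num iters.toNat) := by
  rw [pvFindPrices_eq, pvRes_eq_swap]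
  unfold pvFindSequenceScores pvGA
  rw [List.foldl_map]

theorem pv_dAB_getD (num iters : Int) (k : Int × Int × Int × Int) :
    (pvFindSequenceScores (pvFindPrices num iters)).getD k 0
      = (pvGB (pvMList num iters.toNat)).getD k 0 := by
  rw [Std.HashMap.getD_eq_getD_getElem?, Std.HashMap.getD_eq_getD_getElem?, pv_dA_eq, pvGAB]

theorem pv_dAB_contains (num iters : Int) (k : Int × Int × Int × Int) :
    (pvFindSequenceScores (pvFindPrices num iters)).contains k
      = (pvGB (pvMList num iters.toNat)).contains k := by
  rw [Std.HashMap.contains_eq_isSome_getElem?, Std.HashMap.contains_eq_isSome_getElem?,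
    pv_dA_eq, pvGAB]

theorem pv_outer (iters : Int) (numbers : List Int) :
    ∀ (G T : Std.HashMap (Int × Int × Int × Int) Int),
    (∀ k, G.getD k 0 = T.getD k 0) → (∀ k, G.contains k = T.contains k) →
    ((∀ k, (numbers.foldl (fun g num =>
        pvMerge g (pvFindSequenceScores (pvFindPrices num iters)).toList) G).getD k 0
      = (numbers.foldl (fun t num => pvMerge t (pvGB (pvMList num iters.toNat)).toList) T).getD k 0) ∧
     (∀ k, (numbers.foldl (fun g num =>
        pvMerge g (pvFindSequenceScores (pvFindPrices num iters)).toList) G).contains k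
      = (numbers.foldl (fun t num => pvMerge t (pvGB (pvMList num iters.toNat)).toList) T).contains k)) := by
  induction numbers with
  | nil => intro G T h1 h2; exact ⟨h1, h2⟩
  | cons x xs ih =>
    intro G T h1 h2
    simp only [List.foldl_cons]
    apply ih
    · intro k
      rw [pvMerge_getD_dict, pvMerge_getD_dict, h1, pv_dAB_getD]
    · intro k
      rw [pvMerge_contains_dict, pvMerge_contains_dict, h2, pv_dAB_contains]

theorem pv_toList_perm (G T : Std.HashMap (Int × Int × Int × Int) Int)
    (h1 : ∀ k, G.getD k 0 = T.getD k 0) (h2 : ∀ k, G.contains k = T.contains k) :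
    G.toList.Perm T.toList := by
  have hopt : ∀ k : Int × Int × Int × Int, G[k]? = T[k]? := by
    intro k
    cases hGk : G[k]? with
    | none =>
      cases hTk : T[k]? with
      | none => rfl
      | some v =>
        have hcG : G.contains k = false := by
          rw [Std.HashMap.contains_eq_isSome_getElem?, hGk]; rfl
        have hcT : T.contains k = true := by
          rw [Std.HashMap.contains_eq_isSome_getElem?, hTk]; rfl
        rw [h2 k, hcT] at hcG
        cases hcG
    | some v =>
      cases hTk : T[k]? with
      | none =>
        have hcG : G.contains k = true := by
          rw [Std.HashMap.contains_eq_isSome_getElem?, hGk]; rfl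
        have hcT : T.contains k = false := by
          rw [Std.HashMap.contains_eq_isSome_getElem?, hTk]; rfl
        rw [h2 k, hcT] at hcG
        cases hcG
      | some w =>
        have hg : G.getD k 0 = v := by rw [Std.HashMap.getD_eq_getD_getElem?, hGk]; rfl
        have ht : T.getD k 0 = w := by rw [Std.HashMap.getD_eq_getD_getElem?, hTk]; rfl
        rw [congrArg some (show v = w by rw [← hg, h1 k, ht])]
  have hndG : G.toList.Nodup :=
    List.Pairwise.imp (fun {a b} h => by
      intro he
      rw [he] at h
      simp at h) Std.HashMap.distinct_keys_toList
  have hndT : T.toList.Nodup :=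
    List.Pairwise.imp (fun {a b} h => by
      intro he
      rw [he] at h
      simp at h) Std.HashMap.distinct_keys_toList
  refine (List.perm_ext_iff_of_nodup hndG hndT).2 ?_
  rintro ⟨k, v⟩
  rw [Std.HashMap.mem_toList_iff_getElem?_eq_some, Std.HashMap.mem_toList_iff_getElem?_eq_some,
    hopt k]

theorem pvMax_perm {xs ys : List Int} (h : xs.Perm ys) :
    (PySem.List.max? xs (fun x => x)).getD 0 = (PySem.List.max? ys (fun x => x)).getD 0 := by
  cases hx : PySem.List.max? xs (fun x => x) with
  | none =>
    have hxs : xs = [] := (PySem.List.max?_eq_none_iff xs _).1 hx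
    subst hxs
    have hys : ys = [] := List.Perm.eq_nil h.symm
    subst hys
    rfl
  | some m =>
    cases hy : PySem.List.max? ys (fun x => x) with
    | none =>
      have hys : ys = [] := (PySem.List.max?_eq_none_iff ys _).1 hy
      subst hys
      have hxs : xs = [] := List.Perm.eq_nil h
      rw [hxs] at hx
      cases hx
    | some m' =>
      have hm : m ∈ xs := PySem.List.max?_mem hx
      have hm' : m' ∈ ys := PySem.List.max?_mem hy
      have hle1 : m ≤ m' := PySem.List.max?_isMax hy m (h.mem_iff.1 hm)
      have hle2 : m' ≤ m := PySem.List.max?_isMax hx m' (h.mem_iff.2 hm')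
      simp only [Option.getD_some]
      omega

-- B's per-number zip pipeline, as written in the port (definitionally equal to it)
def pvZipExpr (num iters : Int) : List ((Int × Int × Int × Int) × Int) :=
  let prices := (pvSimPrices num iters).2
  let deltas := (List.zip (PySem.Int.mod num 10 :: prices) prices).map (fun p => p.2 - p.1)
  let windows := List.zip deltas (List.zip (deltas.drop 1) (List.zip (deltas.drop 2) (deltas.drop 3)))
  List.zip windows (prices.drop 3)

theorem pvZipExpr_eq (num iters : Int) : pvZipExpr num iters = pvMList num iters.toNat := by
  simp only [pvZipExpr, pvSim_eq]
  rw [pvDeltas_eq, pvZip_eq]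

theorem pv_main (numbers : List Int) (iters : Int) :
    findBestSequence numbers iters = findBestSequence_alt numbers iters := by
  show (PySem.List.max? ((numbers.foldl (fun g num =>
      pvMerge g (pvFindSequenceScores (pvFindPrices num iters)).toList)
      (∅ : Std.HashMap (Int × Int × Int × Int) Int)).toList.map (fun p => p.2)) (fun x => x)).getD 0
    = (PySem.List.max? ((numbers.foldl (fun t num =>
      pvMerge t (pvGB (pvZipExpr num iters)).toList)
      (∅ : Std.HashMap (Int × Int × Int × Int) Int)).toList.map (fun p => p.2)) (fun x => x)).getD 0
  have hBcong : numbers.foldl (fun t num => pvMerge t (pvGB (pvZipExpr num iters)).toList)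
        (∅ : Std.HashMap (Int × Int × Int × Int) Int)
      = numbers.foldl (fun t num => pvMerge t (pvGB (pvMList num iters.toNat)).toList)
        (∅ : Std.HashMap (Int × Int × Int × Int) Int) :=
    PySem.List.foldl_congr_mem numbers _ _ _ (fun t num _ => by rw [pvZipExpr_eq])
  rw [hBcong]
  obtain ⟨h1, h2⟩ := pv_outer iters numbers ∅ ∅ (fun _ => rfl) (fun _ => rfl)
  exact pvMax_perm ((pv_toList_perm _ _ h1 h2).map _)

-- ===== VERDICT (by name: the statement is the Claim_ definition above) =====
theorem findBestSequence_spec : Claim_equal_findBestSequence := by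
  intro numbers iters _ _
  show findBestSequence numbers iters = findBestSequence_alt numbers iters
  exact pv_main numbers iters
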